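-- pv_equiv track=rewrite | github.com/bassyu/ps | programmers/a.py | max_point
-- ===== SOURCE A (Python) =====
-- point_map = [10-i for i in range(11)]
--
-- def max_point(info, i, n, point):
--     if i >= 10:
--         return point, [n], n
--
--     use = info[i] + 1
--     if n < use:
--         lose, l_history, l_last = max_point(info, i+1, n, point)
--         return lose, [0]+l_history, l_last*10
--
--     lose, l_history, l_last = max_point(info, i+1, n, point)
--     win, w_history, w_last = max_point(info, i+1, n-use, point+point_map[i]*(2 if info[i] else 1))
--
--     if win > lose:
--         return win, [use]+w_history, w_last*10+use
--     elif lose > win: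
--         return lose, [0]+l_history, l_last*10
--     else:
--         return (win, [use]+w_history, w_last*10+use) if w_last > l_last else (lose, [0]+l_history, l_last*10)
-- ===== SOURCE B (Python) =====
-- point_map = [10-i for i in range(11)]
--
-- def _skip(l):
--     lose, l_hist, l_last = l
--     return lose, [0] + l_hist, l_last * 10
--
-- def _choose(use, pm, l, w):
--     win = w[0] + pm
--     if (win, w[2]) > (l[0], l[2]):
--         return win, [use] + w[1], w[2] * 10 + use
--     return _skip(l)
--
-- def max_point(info, i, n, point):
--     # DP: memoize subproblems on (target index, arrows left); the running `point`
--     # is factored out (it shifts every score equally), added back at the end.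
--     memo = {}
--
--     def solve(j, m):
--         if j >= 10:
--             return 0, [m], m
--         key = (j, m)
--         if key in memo:
--             return memo[key]
--         use = info[j] + 1
--         l = solve(j + 1, m)
--         if m < use:
--             res = _skip(l)
--         else:
--             w = solve(j + 1, m - use)
--             res = _choose(use, point_map[j] * (2 if info[j] else 1), l, w)
--         memo[key] = res
--         return res
--
--     g, hist, last = solve(i, n)
--     return point + g, hist, last
-- ===== Notes on version B (the rewrite author's own statement) =====
-- stated objective: alternative
-- what changed: Replaces A's naive doubly-branching recursion with memoized dynamic programming keyed on (target index, arrows left), factoring the running `point` out of the recursion (it uniformly shifts every score) and adding it back at the end, with the lose/win choice done by one lexicographic tuple comparison instead of A's three-way cascade.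
import Mathlib
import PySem

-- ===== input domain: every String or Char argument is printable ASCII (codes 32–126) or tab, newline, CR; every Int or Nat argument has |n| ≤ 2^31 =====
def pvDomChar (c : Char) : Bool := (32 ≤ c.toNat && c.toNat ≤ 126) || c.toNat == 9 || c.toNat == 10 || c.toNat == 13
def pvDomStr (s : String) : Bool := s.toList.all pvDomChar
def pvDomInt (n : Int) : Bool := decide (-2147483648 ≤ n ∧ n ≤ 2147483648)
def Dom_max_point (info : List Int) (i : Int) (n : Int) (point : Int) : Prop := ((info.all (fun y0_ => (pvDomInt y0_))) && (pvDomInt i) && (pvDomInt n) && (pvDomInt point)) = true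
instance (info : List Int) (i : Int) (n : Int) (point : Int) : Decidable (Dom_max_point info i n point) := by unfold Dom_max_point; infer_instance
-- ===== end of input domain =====

-- B replaces A's naive exponential recursion by memoized DP on (target, arrows left),
-- with the running `point` factored out and added back at the end (objective: alternative).

-- point_map = [10-i for i in range(11)]
def point_map : List Int := (PySem.List.pyRange 0 11 1).map (fun i => 10 - i)

-- ===== PORT A =====
-- recursion on i (i+1 until i >= 10) made structural with fuel (10-i).toNat; faithful: fuel 0 ⇔ i ≥ 10
def mpGoA (info : List Int) : Nat → Int → Int → Int → Int × List Int × Int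
  | 0, _, n, point => (point, [n], n)
  | f+1, i, n, point =>
    if 10 ≤ i then (point, [n], n)
    else
      let use := PySem.List.pyGetD info i 0 + 1
      if n < use then
        let l := mpGoA info f (i+1) n point
        (l.1, 0 :: l.2.1, l.2.2 * 10)
      else
        let l := mpGoA info f (i+1) n point
        let w := mpGoA info f (i+1) (n - use)
          (point + PySem.List.pyGetD point_map i 0 * (if PySem.List.pyGetD info i 0 ≠ 0 then 2 else 1))
        if w.1 > l.1 then (w.1, use :: w.2.1, w.2.2 * 10 + use)
        else if l.1 > w.1 then (l.1, 0 :: l.2.1, l.2.2 * 10)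
        else if w.2.2 > l.2.2 then (w.1, use :: w.2.1, w.2.2 * 10 + use)
        else (l.1, 0 :: l.2.1, l.2.2 * 10)

def max_point (info : List Int) (i : Int) (n : Int) (point : Int) : Int × List Int × Int :=
  mpGoA info (10 - i).toNat i n point

-- ===== PORT B =====
-- Source B's helper _skip
def skipB (l : Int × List Int × Int) : Int × List Int × Int :=
  (l.1, 0 :: l.2.1, l.2.2 * 10)

-- Source B's helper _choose (tuple comparison (win, w_last) > (lose, l_last) is the int lex order)
def chooseB (use pm : Int) (l w : Int × List Int × Int) : Int × List Int × Int :=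
  let win := w.1 + pm
  if win > l.1 ∨ (win = l.1 ∧ w.2.2 > l.2.2) then (win, use :: w.2.1, w.2.2 * 10 + use)
  else skipB l

-- memoized solve(j, m) (the running point factored out), memo threaded explicitly; fuel as in port A
def mpGoB (info : List Int) : Nat → Int → Int → PySem.Dict (Int × Int) (Int × List Int × Int) →
    (Int × List Int × Int) × PySem.Dict (Int × Int) (Int × List Int × Int)
  | 0, _, m, memo => ((0, [m], m), memo)
  | f+1, j, m, memo =>
    if 10 ≤ j then ((0, [m], m), memo)
    else
      match memo.get? (j, m) with
      | some v => (v, memo)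
      | none =>
        let use := PySem.List.pyGetD info j 0 + 1
        let lr := mpGoB info f (j+1) m memo
        if m < use then
          let res := skipB lr.1
          (res, lr.2.insert (j, m) res)
        else
          let wr := mpGoB info f (j+1) (m - use) lr.2
          let res := chooseB use
            (PySem.List.pyGetD point_map j 0 * (if PySem.List.pyGetD info j 0 ≠ 0 then 2 else 1))
            lr.1 wr.1
          (res, wr.2.insert (j, m) res)

def max_point_alt (info : List Int) (i : Int) (n : Int) (point : Int) : Int × List Int × Int :=
  let r := (mpGoB info (10 - i).toNat i n PySem.Dict.empty).1
  (point + r.1, r.2.1, r.2.2)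

-- ===== PRECONDITION & SPEC =====
-- Pre_ excludes inputs where A (and B alike) raise IndexError: i < 10 with info shorter than 10
-- or i out of info's (negative-)index range; it also excludes i < -11, where any reachable win
-- branch wraps a negative index past point_map's length and raises IndexError — on the few such
-- inputs pruned before that access A still returns, and B returns the identical value there.
def Pre_max_point (info : List Int) (i : Int) (n : Int) (point : Int) : Prop :=
  10 ≤ i ∨ (10 ≤ (info.length : Int) ∧ -11 ≤ i ∧ -(info.length : Int) ≤ i)
instance (info : List Int) (i : Int) (n : Int) (point : Int) : Decidable (Pre_max_point info i n point) := by unfold Pre_max_point; infer_instance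

def pvWitness_max_point : List Int × Int × Int × Int := ([0,0,0,0,0,0,0,0,0,0], 0, 1, 0)

def Spec_max_point (info : List Int) (i : Int) (n : Int) (point : Int) (out : Int × List Int × Int) : Prop := out = max_point_alt info i n point
instance (info : List Int) (i : Int) (n : Int) (point : Int) (out : Int × List Int × Int) : Decidable (Spec_max_point info i n point out) := by unfold Spec_max_point; infer_instance

-- ===== CLAIM (what is proved, stated in full; the proofs are below) =====
def Claim_equal_max_point : Prop := ∀ (info : List Int) (i : Int) (n : Int) (point : Int), Dom_max_point info i n point → Pre_max_point info i n point → Spec_max_point info i n point (max_point info i n point)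

-- ===== LEMMAS AND PROOFS =====

-- the running `point` only shifts the score component of A's result
theorem mpGoA_shift (info : List Int) : ∀ (f : Nat) (i n p : Int),
    mpGoA info f i n p
      = (p + (mpGoA info f i n 0).1, (mpGoA info f i n 0).2.1, (mpGoA info f i n 0).2.2) := by
  intro f
  induction f with
  | zero => intro i n p; simp [mpGoA]
  | succ f ih =>
    intro i n p
    by_cases h10 : 10 ≤ i
    · simp [mpGoA, h10]
    · simp only [mpGoA, if_neg h10]
      set u := PySem.List.pyGetD info i 0 + 1 with hu
      set pm := PySem.List.pyGetD point_map i 0 * (if PySem.List.pyGetD info i 0 ≠ 0 then 2 else 1) with hpm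
      by_cases hn : n < u
      · simp only [if_pos hn]
        rw [ih (i+1) n p]
      · simp only [if_neg hn]
        rw [ih (i+1) n p, ih (i+1) (n-u) (p + pm), ih (i+1) (n-u) (0 + pm)]
        rcases mpGoA info f (i+1) n 0 with ⟨ls, lh, ll⟩
        rcases mpGoA info f (i+1) (n-u) 0 with ⟨ws, wh, wl⟩
        simp only
        split_ifs with h1 h2 h3 h4 h5 h6 h7 h8 <;> simp_all <;> omega

-- Source B's single lexicographic comparison equals A's three-way cascade (at base point 0)
theorem chooseB_spec (use pm : Int) (l w : Int × List Int × Int) :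
    chooseB use pm l w
      = (if 0 + pm + w.1 > l.1 then (0 + pm + w.1, use :: w.2.1, w.2.2 * 10 + use)
         else if l.1 > 0 + pm + w.1 then (l.1, 0 :: l.2.1, l.2.2 * 10)
         else if w.2.2 > l.2.2 then (0 + pm + w.1, use :: w.2.1, w.2.2 * 10 + use)
         else (l.1, 0 :: l.2.1, l.2.2 * 10)) := by
  rcases l with ⟨ls, lh, ll⟩
  rcases w with ⟨ws, wh, wl⟩
  simp only [chooseB, skipB]
  split_ifs <;> simp_all <;> omega

def InvMemo (info : List Int) (d : PySem.Dict (Int × Int) (Int × List Int × Int)) : Prop :=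
  ∀ (j m : Int) (v : Int × List Int × Int), d.get? (j, m) = some v → v = mpGoA info (10 - j).toNat j m 0

theorem mpGoB_correct (info : List Int) : ∀ (f : Nat) (j m : Int)
    (d : PySem.Dict (Int × Int) (Int × List Int × Int)),
    f = (10 - j).toNat → InvMemo info d →
    (mpGoB info f j m d).1 = mpGoA info f j m 0 ∧ InvMemo info (mpGoB info f j m d).2 := by
  intro f
  induction f with
  | zero =>
    intro j m d hf hd
    constructor
    · simp [mpGoB, mpGoA]
    · simpa [mpGoB] using hd
  | succ f ih =>
    intro j m d hf hd
    have hj : ¬ 10 ≤ j := by omega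
    have hf' : f = (10 - (j+1)).toNat := by omega
    cases hget : d.get? (j, m) with
    | some v =>
      simp only [mpGoB, if_neg hj, hget]
      refine ⟨?_, hd⟩
      have := hd j m v hget
      rw [this, ← hf]
    | none =>
      simp only [mpGoB, if_neg hj, hget]
      set u := PySem.List.pyGetD info j 0 + 1 with hu
      set pm := PySem.List.pyGetD point_map j 0 * (if PySem.List.pyGetD info j 0 ≠ 0 then 2 else 1) with hpm
      obtain ⟨hl1, hl2⟩ := ih (j+1) m d hf' hd
      by_cases hn : m < u
      · simp only [if_pos hn]
        have hresA : skipB (mpGoB info f (j+1) m d).1 = mpGoA info (f+1) j m 0 := by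
          rw [hl1]
          simp only [mpGoA, if_neg hj, ← hu, if_pos hn, skipB]
        refine ⟨by simpa using hresA, ?_⟩
        intro j' m' v hv
        rw [PySem.Dict.get?_insert] at hv
        by_cases hk : (j', m') = (j, m)
        · rw [if_pos hk] at hv
          simp only [Option.some.injEq] at hv
          have h1k : j' = j := congrArg Prod.fst hk
          have h2k : m' = m := congrArg Prod.snd hk
          subst h1k; subst h2k
          rw [← hv, hresA, ← hf]
        · rw [if_neg hk] at hv
          exact hl2 j' m' v hv
      · simp only [if_neg hn]
        obtain ⟨hw1, hw2⟩ := ih (j+1) (m - u) (mpGoB info f (j+1) m d).2 hf' hl2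
        have hresA : chooseB u pm (mpGoB info f (j+1) m d).1
            (mpGoB info f (j+1) (m - u) (mpGoB info f (j+1) m d).2).1 = mpGoA info (f+1) j m 0 := by
          rw [hl1, hw1, chooseB_spec]
          simp only [mpGoA, if_neg hj, ← hu, ← hpm, if_neg hn]
          rw [mpGoA_shift info f (j+1) (m - u) (0 + pm)]
        refine ⟨by simpa using hresA, ?_⟩
        intro j' m' v hv
        rw [PySem.Dict.get?_insert] at hv
        by_cases hk : (j', m') = (j, m)
        · rw [if_pos hk] at hv
          simp only [Option.some.injEq] at hv
          have h1k : j' = j := congrArg Prod.fst hk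
          have h2k : m' = m := congrArg Prod.snd hk
          subst h1k; subst h2k
          rw [← hv, hresA, ← hf]
        · rw [if_neg hk] at hv
          exact hw2 j' m' v hv

-- ===== VERDICT (by name: the statement is the Claim_ definition above) =====
theorem max_point_spec : Claim_equal_max_point := by
  intro info i n point _ _
  unfold Spec_max_point max_point max_point_alt
  have hinv : InvMemo info PySem.Dict.empty := by
    intro j m v hv
    simp [PySem.Dict.get?_empty] at hv
  obtain ⟨h1, _⟩ := mpGoB_correct info (10 - i).toNat i n PySem.Dict.empty rfl hinv
  rw [mpGoA_shift info (10 - i).toNat i n point, h1]
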